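-- pv_equiv track=rewrite | github.com/gabe-rbo/pySurgery | pysurgery/core/geometrization_3d.py | _build_face_to_tetrahedra
-- ===== SOURCE A (Python) =====
-- from itertools import combinations
-- from typing import Iterable, Optional, Sequence
--
-- def _sorted_face(face: Iterable[int]) -> tuple[int, int, int]:
--     """Normalize a triangle face to a sorted tuple.
--
--     Args:
--         face (Iterable[int]): The vertices of the face.
--
--     Returns:
--         tuple[int, int, int]: The sorted vertices.
--
--     Raises:
--         ValueError: If the face does not have exactly 3 vertices.
--     """
--     t = tuple(sorted(int(v) for v in face))
--     if len(t) != 3: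
--         raise ValueError(f"Expected a triangle face, got {face!r}")
--     return t
--
-- def _build_face_to_tetrahedra(
--     tetrahedra: Sequence[tuple[int, int, int, int]],
-- ) -> dict[tuple[int, int, int], tuple[int, ...]]:
--     """Build a mapping from faces to indices of tetrahedra containing them.
--
--     Args:
--         tetrahedra (Sequence[tuple[int, int, int, int]]): List of tetrahedra.
--
--     Returns:
--         dict[tuple[int, int, int], tuple[int, ...]]: Face to tetrahedron indices.
--     """
--     face_map: dict[tuple[int, int, int], list[int]] = {}
--     for tet_idx, tet in enumerate(tetrahedra):
--         for face in combinations(tet, 3):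
--             face_map.setdefault(_sorted_face(face), []).append(tet_idx)
--     return {face: tuple(indices) for face, indices in face_map.items()}
-- ===== SOURCE B (Python) =====
-- from itertools import combinations
-- from typing import Iterable, Sequence
--
--
-- def _sorted_face(face: Iterable[int]) -> tuple[int, int, int]:
--     t = tuple(sorted(int(v) for v in face))
--     if len(t) != 3:
--         raise ValueError(f"Expected a triangle face, got {face!r}")
--     return t
--
--
-- def _build_face_to_tetrahedra(
--     tetrahedra: Sequence[tuple[int, int, int, int]],
-- ) -> dict[tuple[int, int, int], tuple[int, ...]]:
--     # First collect the distinct faces; then, for each face, scan the whole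
--     # tetrahedron list and gather the indices of the tetrahedra containing it.
--     faces: list[tuple[int, int, int]] = []
--     seen: set[tuple[int, int, int]] = set()
--     for tet in tetrahedra:
--         for corner_triple in combinations(tet, 3):
--             f = _sorted_face(corner_triple)
--             if f not in seen:
--                 seen.add(f)
--                 faces.append(f)
--     return {
--         f: tuple(
--             i
--             for i, tet in enumerate(tetrahedra)
--             for corner_triple in combinations(tet, 3)
--             if _sorted_face(corner_triple) == f
--         )
--         for f in faces
--     }
-- ===== Notes on version B (the rewrite author's own statement) =====
-- stated objective: alternative
-- what changed: Replaces A's single-pass hash-map (setdefault/append) accumulation by a two-stage brute-force strategy: first collect the distinct faces in encounter order, then for each distinct face rescan the whole tetrahedron list to gather the indices of tetrahedra containing it.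
import Mathlib
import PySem

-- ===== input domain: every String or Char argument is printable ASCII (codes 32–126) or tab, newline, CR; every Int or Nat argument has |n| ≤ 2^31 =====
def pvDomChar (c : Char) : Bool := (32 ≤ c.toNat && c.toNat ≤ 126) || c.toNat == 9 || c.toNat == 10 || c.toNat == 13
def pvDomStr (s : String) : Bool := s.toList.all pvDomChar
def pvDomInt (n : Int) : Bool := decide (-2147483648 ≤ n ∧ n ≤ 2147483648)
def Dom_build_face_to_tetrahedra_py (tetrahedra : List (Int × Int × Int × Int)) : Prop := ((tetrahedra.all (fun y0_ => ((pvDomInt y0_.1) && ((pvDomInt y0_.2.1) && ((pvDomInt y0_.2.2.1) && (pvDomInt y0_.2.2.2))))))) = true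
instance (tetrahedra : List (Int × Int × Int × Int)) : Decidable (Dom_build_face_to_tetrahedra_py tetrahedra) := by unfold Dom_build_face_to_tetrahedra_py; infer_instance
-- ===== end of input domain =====

-- B replaces A's one-pass hash-map accumulation by a two-stage brute-force scheme:
-- collect the distinct faces in encounter order, then for each face rescan all
-- tetrahedra to gather its indices (objective: alternative, not faster).

-- ===== PORT A =====

-- _sorted_face: tuple(sorted(face)); the length-3 check never fires for a 3-element
-- input, so the fallback branch of the match is unreachable.
def pvSortedFace (a b c : Int) : Int × Int × Int :=
  match PySem.List.sorted [a, b, c] (fun x => x) false with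
  | [x, y, z] => (x, y, z)
  | _ => (a, b, c)

-- combinations(tet, 3), each face normalized by _sorted_face
def pvFaces (t : Int × Int × Int × Int) : List (Int × Int × Int) :=
  [pvSortedFace t.1 t.2.1 t.2.2.1,
   pvSortedFace t.1 t.2.1 t.2.2.2,
   pvSortedFace t.1 t.2.2.1 t.2.2.2,
   pvSortedFace t.2.1 t.2.2.1 t.2.2.2]

def build_face_to_tetrahedra_py (tetrahedra : List (Int × Int × Int × Int)) : List (Int × Int × Int × List Int) :=
  -- face_map.setdefault(face, []).append(tet_idx)  ==  face_map[face] = face_map.get(face, []) + [tet_idx]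
  let face_map : PySem.Dict (Int × Int × Int) (List Int) :=
    (PySem.List.enumerate tetrahedra).foldl
      (fun d p => (pvFaces p.2).foldl (fun d f => d.modify f [] (· ++ [p.1])) d)
      PySem.Dict.empty
  -- {face: tuple(indices) for face, indices in face_map.items()}
  let result : PySem.Dict (Int × Int × Int) (List Int) :=
    face_map.items.foldl (fun acc p => acc.insert p.1 p.2) PySem.Dict.empty
  result.items.map (fun p => (p.1.1, p.1.2.1, p.1.2.2, p.2))

-- ===== PORT B =====

def build_face_to_tetrahedra_py_alt (tetrahedra : List (Int × Int × Int × Int)) : List (Int × Int × Int × List Int) :=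
  -- the seen/append loop: distinct faces in encounter order = PySem.Set.ofList
  let faces : List (Int × Int × Int) := PySem.Set.ofList (tetrahedra.flatMap (fun tet => pvFaces tet))
  -- {f: tuple(i for i, tet in enumerate(tetrahedra) for ct in combinations(tet, 3) if _sorted_face(ct) == f) for f in faces}
  faces.map (fun f =>
    (f.1, f.2.1, f.2.2,
      (PySem.List.enumerate tetrahedra).flatMap (fun p =>
        (pvFaces p.2).filterMap (fun f' => if f' == f then some p.1 else none))))

-- ===== PRECONDITION & SPEC =====
def Spec_build_face_to_tetrahedra_py (tetrahedra : List (Int × Int × Int × Int)) (out : List (Int × Int × Int × List Int)) : Prop := out = build_face_to_tetrahedra_py_alt tetrahedra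
instance (tetrahedra : List (Int × Int × Int × Int)) (out : List (Int × Int × Int × List Int)) : Decidable (Spec_build_face_to_tetrahedra_py tetrahedra out) := by unfold Spec_build_face_to_tetrahedra_py; infer_instance

-- ===== CLAIM (what is proved, stated in full; the proofs are below) =====
def Claim_equal_build_face_to_tetrahedra_py : Prop := ∀ (tetrahedra : List (Int × Int × Int × Int)), Dom_build_face_to_tetrahedra_py tetrahedra → Spec_build_face_to_tetrahedra_py tetrahedra (build_face_to_tetrahedra_py tetrahedra)

-- ===== LEMMAS AND PROOFS =====

-- A's nested loop is the flat loop over the incidence list ps.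
theorem pvA_fold_eq_flat (tetrahedra : List (Int × Int × Int × Int)) :
    (PySem.List.enumerate tetrahedra).foldl
      (fun d p => (pvFaces p.2).foldl (fun d f => d.modify f [] (· ++ [p.1])) d)
      PySem.Dict.empty
    = ((PySem.List.enumerate tetrahedra).flatMap (fun p => (pvFaces p.2).map (fun f => (f, p.1)))).foldl
        (fun d q => d.modify q.1 [] (· ++ [q.2])) PySem.Dict.empty := by
  simp only [List.foldl_flatMap, List.foldl_map]

-- A's face_map lookups
theorem pvA_dict_getD (l : List ((Int × Int × Int) × Int)) (c : Int × Int × Int) :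
    (l.foldl (fun d q => d.modify q.1 [] (· ++ [q.2])) (PySem.Dict.empty : PySem.Dict (Int × Int × Int) (List Int))).getD c []
    = (l.filter (fun p => p.1 == c)).map (·.2) := by
  simpa using PySem.Dict.getD_foldl_modify_append (l := l)
    (d := (PySem.Dict.empty : PySem.Dict (Int × Int × Int) (List Int))) (c := c)

-- the first components of the incidence list are the flattened faces
theorem pvPs_map_fst (tetrahedra : List (Int × Int × Int × Int)) :
    ((PySem.List.enumerate tetrahedra).flatMap (fun p => (pvFaces p.2).map (fun f => (f, p.1)))).map (·.1)
    = tetrahedra.flatMap (fun tet => pvFaces tet) := by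
  rw [List.map_flatMap]
  simp only [List.map_map]
  have : ∀ (s : Int), (PySem.List.enumerate tetrahedra s).flatMap (fun p => (pvFaces p.2).map ((·.1) ∘ fun f => (f, p.1)))
      = tetrahedra.flatMap (fun tet => pvFaces tet) := by
    induction tetrahedra with
    | nil => intro s; simp [PySem.List.enumerate_nil]
    | cons t rest ih =>
      intro s
      simp only [PySem.List.enumerate_cons, List.flatMap_cons, ih]
      congr 1
  exact this 0

theorem pvFilterMap_const {a b : Type} (l : List a) (q : a -> Bool) (i : b) :
    (l.filter q).map (fun _ => i) = l.filterMap (fun x => if q x then some i else none) := by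
  induction l with
  | nil => rfl
  | cons x rest ih =>
    by_cases h : q x = true
    · simp [h, ih]
    · simp only [Bool.not_eq_true] at h
      simp [h, ih]

-- filtering the incidence list for one face = B's per-face scan
theorem pvFilter_eq_scan (tetrahedra : List (Int × Int × Int × Int)) (k : Int × Int × Int) :
    (((PySem.List.enumerate tetrahedra).flatMap (fun p => (pvFaces p.2).map (fun f => (f, p.1)))).filter (fun p => p.1 == k)).map (·.2)
    = (PySem.List.enumerate tetrahedra).flatMap (fun p =>
        (pvFaces p.2).filterMap (fun f' => if f' == k then some p.1 else none)) := by
  rw [List.filter_flatMap, List.map_flatMap]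
  refine List.flatMap_congr (fun p _ => ?_)
  rw [List.filter_map, List.map_map]
  exact pvFilterMap_const (pvFaces p.2) (fun f' => f' == k) p.1

-- ===== VERDICT (by name: the statement is the Claim_ definition above) =====
theorem build_face_to_tetrahedra_py_spec : Claim_equal_build_face_to_tetrahedra_py := by
  intro tets _
  show build_face_to_tetrahedra_py tets = build_face_to_tetrahedra_py_alt tets
  simp only [build_face_to_tetrahedra_py, build_face_to_tetrahedra_py_alt]
  rw [pvA_fold_eq_flat]
  set ps := (PySem.List.enumerate tets).flatMap (fun p => (pvFaces p.2).map (fun f => (f, p.1))) with hps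
  set fm := ps.foldl (fun d q => d.modify q.1 [] (· ++ [q.2])) (PySem.Dict.empty : PySem.Dict (Int × Int × Int) (List Int)) with hfm
  have hfm_nodup : fm.keys.Nodup := by
    rw [hfm]
    exact PySem.Dict.nodup_keys_foldl_modify_key ps (·.1) [] (fun _ q => (· ++ [q.2])) _ (by simp)
  have hA := PySem.Dict.items_foldl_insert_fresh (l := fm.items) (k := fun p => p.1) (v := fun p => p.2)
    (d := (PySem.Dict.empty : PySem.Dict (Int × Int × Int) (List Int)))
    (by simp) (by simpa [PySem.Dict.keys] using hfm_nodup)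
  rw [hA]
  simp only [show (PySem.Dict.empty : PySem.Dict (Int × Int × Int) (List Int)).items = [] from rfl,
    List.nil_append, Prod.mk.eta, List.map_id']
  have hfm_keys : fm.keys = PySem.Set.ofList (ps.map (·.1)) := by
    rw [hfm]
    have := PySem.Dict.keys_foldl_modify_key (l := ps) (key := (·.1)) (d0 := ([] : List Int))
      (f := fun _ q => (· ++ [q.2])) (d := (PySem.Dict.empty : PySem.Dict (Int × Int × Int) (List Int)))
    simpa [PySem.Set.update_empty] using this
  have hfm_items : fm.items = (PySem.Set.ofList (ps.map (·.1))).map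
      (fun k => (k, (ps.filter (fun p => p.1 == k)).map (·.2))) := by
    rw [PySem.Dict.items_eq_map_keys _ hfm_nodup [], hfm_keys]
    refine List.map_congr_left (fun k _ => ?_)
    rw [hfm, pvA_dict_getD]
  rw [hfm_items, List.map_map, hps, pvPs_map_fst]
  refine List.map_congr_left (fun k _ => ?_)
  simp only [Function.comp, ← pvFilter_eq_scan tets k]
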